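-- pv_equiv track=rewrite | github.com/APTOL-7176/Dawn-of-Stellar | ai_multiplayer_launcher.py | english_to_korean
-- ===== SOURCE A (Python) =====
-- def english_to_korean(text: str) -> str:
--     """영어 입력을 한글로 변환"""
--     # 영어 키보드를 한글로 매핑
--     eng_to_kor = {
--         'q': 'ㅂ', 'w': 'ㅈ', 'e': 'ㄷ', 'r': 'ㄱ', 't': 'ㅅ', 'y': 'ㅛ', 'u': 'ㅕ', 'i': 'ㅑ', 'o': 'ㅐ', 'p': 'ㅔ',
--         'a': 'ㅁ', 's': 'ㄴ', 'd': 'ㅇ', 'f': 'ㄹ', 'g': 'ㅎ', 'h': 'ㅗ', 'j': 'ㅓ', 'k': 'ㅏ', 'l': 'ㅣ',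
--         'z': 'ㅋ', 'x': 'ㅌ', 'c': 'ㅊ', 'v': 'ㅍ', 'b': 'ㅠ', 'n': 'ㅜ', 'm': 'ㅡ',
--         # 대문자도 포함
--         'Q': 'ㅃ', 'W': 'ㅉ', 'E': 'ㄸ', 'R': 'ㄲ', 'T': 'ㅆ', 'Y': 'ㅛ', 'U': 'ㅕ', 'I': 'ㅑ', 'O': 'ㅒ', 'P': 'ㅖ',
--     }
--
--     # 먼저 자모로 변환
--     jamo_result = ""
--     for char in text:
--         if char in eng_to_kor:
--             jamo_result += eng_to_kor[char]
--         else: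
--             jamo_result += char
--
--     # 자모를 한글로 조합
--     return combine_jamo_to_hangul(jamo_result)
--
-- def combine_jamo_to_hangul(jamo_text: str) -> str:
--     """자모를 조합하여 완성된 한글로 만들기"""
--     # 초성, 중성, 종성 정의
--     CHOSUNG = ['ㄱ', 'ㄲ', 'ㄴ', 'ㄷ', 'ㄸ', 'ㄹ', 'ㅁ', 'ㅂ', 'ㅃ', 'ㅅ', 'ㅆ', 'ㅇ', 'ㅈ', 'ㅉ', 'ㅊ', 'ㅋ', 'ㅌ', 'ㅍ', 'ㅎ']
--     JUNGSUNG = ['ㅏ', 'ㅐ', 'ㅑ', 'ㅒ', 'ㅓ', 'ㅔ', 'ㅕ', 'ㅖ', 'ㅗ', 'ㅘ', 'ㅙ', 'ㅚ', 'ㅛ', 'ㅜ', 'ㅝ', 'ㅞ', 'ㅟ', 'ㅠ', 'ㅡ', 'ㅢ', 'ㅣ']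
--     JONGSUNG = ['', 'ㄱ', 'ㄲ', 'ㄳ', 'ㄴ', 'ㄵ', 'ㄶ', 'ㄷ', 'ㄹ', 'ㄺ', 'ㄻ', 'ㄼ', 'ㄽ', 'ㄾ', 'ㄿ', 'ㅀ', 'ㅁ', 'ㅂ', 'ㅄ', 'ㅅ', 'ㅆ', 'ㅇ', 'ㅈ', 'ㅊ', 'ㅋ', 'ㅌ', 'ㅍ', 'ㅎ']
--
--     # 자모가 너무 적으면 그대로 반환
--     if len(jamo_text) < 2:
--         return jamo_text
--
--     result = ""
--     i = 0
--
--     while i < len(jamo_text):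
--         char = jamo_text[i]
--
--         # 초성으로 사용할 수 있는지 확인
--         if char in CHOSUNG:
--             cho_idx = CHOSUNG.index(char)
--
--             # 다음 글자가 중성인지 확인
--             if i + 1 < len(jamo_text):
--                 next_char = jamo_text[i + 1]
--
--                 # 중성인지 확인
--                 if next_char in JUNGSUNG:
--                     jung_idx = JUNGSUNG.index(next_char)
--                     jong_idx = 0  # 종성 없음
--                     advance = 2
--
--                     # 그 다음 글자가 종성으로 사용 가능한지 확인
--                     if i + 2 < len(jamo_text):
--                         third_char = jamo_text[i + 2]
--                         # 종성으로 사용할 수 있는 자음인지 확인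
--                         if third_char in JONGSUNG[1:]:  # 빈 종성 제외
--                             # 하지만 그 다음에 중성이 오면 새 글자 시작
--                             if i + 3 < len(jamo_text) and jamo_text[i + 3] in JUNGSUNG:
--                                 # 종성을 사용하지 말고 다음 글자 시작
--                                 pass
--                             else:
--                                 jong_idx = JONGSUNG.index(third_char)
--                                 advance = 3
--
--                     # 유니코드로 조합
--                     unicode_val = 0xAC00 + (cho_idx * 21 * 28) + (jung_idx * 28) + jong_idx
--                     result += chr(unicode_val)
--                     i += advance
--                     continue
--
--         # 조합하지 못한 경우 그대로 추가
--         result += char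
--         i += 1
--
--     return result
-- ===== SOURCE B (Python) =====
-- def english_to_korean(text: str) -> str:
--     """영어 입력을 한글로 변환 — streaming state machine instead of index-with-advance loop."""
--     ENG = {
--         'q': 'ㅂ', 'w': 'ㅈ', 'e': 'ㄷ', 'r': 'ㄱ', 't': 'ㅅ', 'y': 'ㅛ', 'u': 'ㅕ', 'i': 'ㅑ', 'o': 'ㅐ', 'p': 'ㅔ',
--         'a': 'ㅁ', 's': 'ㄴ', 'd': 'ㅇ', 'f': 'ㄹ', 'g': 'ㅎ', 'h': 'ㅗ', 'j': 'ㅓ', 'k': 'ㅏ', 'l': 'ㅣ',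
--         'z': 'ㅋ', 'x': 'ㅌ', 'c': 'ㅊ', 'v': 'ㅍ', 'b': 'ㅠ', 'n': 'ㅜ', 'm': 'ㅡ',
--         'Q': 'ㅃ', 'W': 'ㅉ', 'E': 'ㄸ', 'R': 'ㄲ', 'T': 'ㅆ', 'Y': 'ㅛ', 'U': 'ㅕ', 'I': 'ㅑ', 'O': 'ㅒ', 'P': 'ㅖ',
--     }
--     CHO = 'ㄱㄲㄴㄷㄸㄹㅁㅂㅃㅅㅆㅇㅈㅉㅊㅋㅌㅍㅎ'
--     JUNG = 'ㅏㅐㅑㅒㅓㅔㅕㅖㅗㅘㅙㅚㅛㅜㅝㅞㅟㅠㅡㅢㅣ'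
--     JONG = 'ㄱㄲㄳㄴㄵㄶㄷㄹㄺㄻㄼㄽㄾㄿㅀㅁㅂㅄㅅㅆㅇㅈㅊㅋㅌㅍㅎ'  # jong-capable (index+1 = jongsung code)
--
--     def compose(c, v, jong_idx):
--         return chr(0xAC00 + CHO.index(c) * 588 + JUNG.index(v) * 28 + jong_idx)
--
--     out = []
--     # state: (cho, jung, pending_jong) with trailing Nones; () = empty
--     cho = jung = tail = None
--
--     def flush():
--         nonlocal cho, jung, tail
--         if cho is not None:
--             if jung is None:
--                 out.append(cho)
--             elif tail is None:
--                 out.append(compose(cho, jung, 0))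
--             else:
--                 out.append(compose(cho, jung, JONG.index(tail) + 1))
--         cho = jung = tail = None
--
--     for ch in map(lambda c: ENG.get(c, c), text):
--         if cho is not None and jung is None:
--             # have a lone choseong: attach a vowel or flush
--             if ch in JUNG:
--                 jung = ch
--                 continue
--             flush()
--         elif jung is not None and tail is None:
--             # open syllable: buffer a jong-capable consonant
--             if ch in JONG:
--                 tail = ch
--                 continue
--             flush()
--         elif tail is not None:
--             # buffered consonant: steal it as next cho if a vowel follows
--             if ch in JUNG:
--                 t = tail
--                 tail = None
--                 flush()
--                 if t in CHO:
--                     cho, jung = t, ch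
--                 else:
--                     out.append(t)
--                     out.append(ch)
--                 continue
--             flush()
--         # empty state
--         if ch in CHO:
--             cho = ch
--         else:
--             out.append(ch)
--     flush()
--     return ''.join(out)
-- ===== Notes on version B (the rewrite author's own statement) =====
-- stated objective: faster
-- what changed: Replaces A's index-with-advance while-loop (lookahead of up to 3 characters, advance 1/2/3) by a single streaming pass that maintains a syllable state (lone choseong / open syllable / open syllable with a buffered pending consonant), appends to a list joined once instead of quadratic str +=.
import Mathlib
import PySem

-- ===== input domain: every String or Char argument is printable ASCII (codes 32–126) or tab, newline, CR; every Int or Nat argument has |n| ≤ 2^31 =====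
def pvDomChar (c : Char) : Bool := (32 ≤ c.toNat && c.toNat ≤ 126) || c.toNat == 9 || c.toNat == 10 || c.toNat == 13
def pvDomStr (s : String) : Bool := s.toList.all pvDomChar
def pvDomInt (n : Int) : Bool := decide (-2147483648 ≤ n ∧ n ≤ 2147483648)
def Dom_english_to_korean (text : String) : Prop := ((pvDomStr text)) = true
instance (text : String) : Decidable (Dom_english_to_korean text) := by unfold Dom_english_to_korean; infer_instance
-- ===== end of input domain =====

-- B replaces A's index-with-advance combining loop by a streaming state machine with a
-- buffered pending consonant, building the output as a list joined once (measured faster).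

-- ===== PORT A =====
-- shared constant tables (values from the Python source)
def pvEngKor : PySem.Dict Char Char := PySem.Dict.ofList
  [('q', 'ㅂ'), ('w', 'ㅈ'), ('e', 'ㄷ'), ('r', 'ㄱ'), ('t', 'ㅅ'), ('y', 'ㅛ'), ('u', 'ㅕ'),
   ('i', 'ㅑ'), ('o', 'ㅐ'), ('p', 'ㅔ'),
   ('a', 'ㅁ'), ('s', 'ㄴ'), ('d', 'ㅇ'), ('f', 'ㄹ'), ('g', 'ㅎ'), ('h', 'ㅗ'), ('j', 'ㅓ'),
   ('k', 'ㅏ'), ('l', 'ㅣ'),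
   ('z', 'ㅋ'), ('x', 'ㅌ'), ('c', 'ㅊ'), ('v', 'ㅍ'), ('b', 'ㅠ'), ('n', 'ㅜ'), ('m', 'ㅡ'),
   ('Q', 'ㅃ'), ('W', 'ㅉ'), ('E', 'ㄸ'), ('R', 'ㄲ'), ('T', 'ㅆ'), ('Y', 'ㅛ'), ('U', 'ㅕ'),
   ('I', 'ㅑ'), ('O', 'ㅒ'), ('P', 'ㅖ')]

def pvCHO : List Char :=
  ['ㄱ', 'ㄲ', 'ㄴ', 'ㄷ', 'ㄸ', 'ㄹ', 'ㅁ', 'ㅂ', 'ㅃ', 'ㅅ', 'ㅆ', 'ㅇ', 'ㅈ', 'ㅉ', 'ㅊ', 'ㅋ', 'ㅌ', 'ㅍ', 'ㅎ']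
def pvJUNG : List Char :=
  ['ㅏ', 'ㅐ', 'ㅑ', 'ㅒ', 'ㅓ', 'ㅔ', 'ㅕ', 'ㅖ', 'ㅗ', 'ㅘ', 'ㅙ', 'ㅚ', 'ㅛ', 'ㅜ', 'ㅝ', 'ㅞ', 'ㅟ', 'ㅠ', 'ㅡ', 'ㅢ', 'ㅣ']
-- Python's JONGSUNG with its leading '' dropped: the empty string never equals a one-char
-- string, so 'x in JONGSUNG[1:]' = x ∈ pvJONG1 and JONGSUNG.index(x) = (index in pvJONG1) + 1, exactly.
def pvJONG1 : List Char :=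
  ['ㄱ', 'ㄲ', 'ㄳ', 'ㄴ', 'ㄵ', 'ㄶ', 'ㄷ', 'ㄹ', 'ㄺ', 'ㄻ', 'ㄼ', 'ㄽ', 'ㄾ', 'ㄿ', 'ㅀ', 'ㅁ', 'ㅂ', 'ㅄ', 'ㅅ', 'ㅆ', 'ㅇ', 'ㅈ', 'ㅊ', 'ㅋ', 'ㅌ', 'ㅍ', 'ㅎ']

-- A's while-loop over jamo_text with index i and advance ∈ {1,2,3}, transcribed as
-- recursion over the suffix (i ↦ drop i); every test in the same order as the Python.
def pvCombineA : List Char → List Char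
  | [] => []
  | c :: rest =>
    if c ∈ pvCHO then
      match rest with
      | [] => [c]                              -- i+1 = len: no 중성 follows
      | n :: rest2 =>
        if n ∈ pvJUNG then
          let cho := (PySem.List.index? pvCHO c).getD 0
          let jung := (PySem.List.index? pvJUNG n).getD 0
          match rest2 with
          | [] => [Char.ofNat (0xAC00 + cho * 21 * 28 + jung * 28 + 0)]
          | t :: rest3 =>
            if t ∈ pvJONG1 then
              match rest3 with
              | f :: tl =>
                if f ∈ pvJUNG then
                  Char.ofNat (0xAC00 + cho * 21 * 28 + jung * 28 + 0) :: pvCombineA (t :: f :: tl)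
                else
                  Char.ofNat (0xAC00 + cho * 21 * 28 + jung * 28 +
                    ((PySem.List.index? pvJONG1 t).getD 0 + 1)) :: pvCombineA (f :: tl)
              | [] =>
                  [Char.ofNat (0xAC00 + cho * 21 * 28 + jung * 28 +
                    ((PySem.List.index? pvJONG1 t).getD 0 + 1))]
            else
              Char.ofNat (0xAC00 + cho * 21 * 28 + jung * 28 + 0) :: pvCombineA (t :: rest3)
        else c :: pvCombineA (n :: rest2)
    else c :: pvCombineA rest
termination_by l => l.length
decreasing_by all_goals simp

def english_to_korean (text : String) : String :=
  let jamo := text.toList.map (fun c => pvEngKor.getD c c)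
  if jamo.length < 2 then String.ofList jamo
  else String.ofList (pvCombineA jamo)

-- ===== PORT B =====
-- B's state: nothing / lone 초성 / open syllable / open syllable + buffered trailing consonant.
inductive PvSt : Type
  | empty : PvSt
  | cho : Char → PvSt
  | cj : Char → Char → PvSt
  | cjj : Char → Char → Char → PvSt
deriving DecidableEq, Repr

def pvCompose (c v : Char) (jong : Nat) : Char :=
  Char.ofNat (0xAC00 + (PySem.List.index? pvCHO c).getD 0 * 588 +
    (PySem.List.index? pvJUNG v).getD 0 * 28 + jong)

def pvFlush : PvSt → List Char
  | .empty => []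
  | .cho c => [c]
  | .cj c v => [pvCompose c v 0]
  | .cjj c v t => [pvCompose c v ((PySem.List.index? pvJONG1 t).getD 0 + 1)]

def pvStepEmpty (ch : Char) : List Char × PvSt :=
  if ch ∈ pvCHO then ([], .cho ch) else ([ch], .empty)

def pvStep : PvSt → Char → List Char × PvSt
  | .empty, ch => pvStepEmpty ch
  | .cho c, ch =>
      if ch ∈ pvJUNG then ([], .cj c ch)
      else let (o, s) := pvStepEmpty ch; (c :: o, s)
  | .cj c v, ch =>
      if ch ∈ pvJONG1 then ([], .cjj c v ch)
      else let (o, s) := pvStepEmpty ch; (pvCompose c v 0 :: o, s)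
  | .cjj c v t, ch =>
      if ch ∈ pvJUNG then
        if t ∈ pvCHO then ([pvCompose c v 0], .cj t ch)
        else ([pvCompose c v 0, t, ch], .empty)
      else
        let (o, s) := pvStepEmpty ch
        (pvCompose c v ((PySem.List.index? pvJONG1 t).getD 0 + 1) :: o, s)

def pvRunB : PvSt → List Char → List Char
  | st, [] => pvFlush st
  | st, ch :: rest => let (o, s) := pvStep st ch; o ++ pvRunB s rest

def english_to_korean_alt (text : String) : String :=
  String.ofList (pvRunB .empty (text.toList.map (fun c => pvEngKor.getD c c)))

-- ===== PRECONDITION & SPEC =====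
def Spec_english_to_korean (text : String) (out : String) : Prop := out = english_to_korean_alt text
instance (text : String) (out : String) : Decidable (Spec_english_to_korean text out) := by unfold Spec_english_to_korean; infer_instance

-- ===== CLAIM (what is proved, stated in full; the proofs are below) =====
def Claim_equal_english_to_korean : Prop := ∀ (text : String), Dom_english_to_korean text → Spec_english_to_korean text (english_to_korean text)

-- ===== LEMMAS AND PROOFS =====

theorem pvMul (n : Nat) : n * 21 * 28 = n * 588 := by ring

theorem pvJung_not_cho {f : Char} (h : f ∈ pvJUNG) : f ∉ pvCHO := by
  fin_cases h <;> decide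

-- unfolding lemmas for A's loop, one per advance shape
theorem pvA_nil : pvCombineA [] = [] := by simp [pvCombineA]

theorem pvA_one (c : Char) : pvCombineA [c] = [c] := by simp [pvCombineA]

theorem pvA_not_cho {c : Char} (r : List Char) (hc : c ∉ pvCHO) :
    pvCombineA (c :: r) = c :: pvCombineA r := by
  conv_lhs => rw [pvCombineA.eq_def]
  simp [hc]

theorem pvA_cho_not_jung {c n : Char} (r : List Char) (hc : c ∈ pvCHO) (hn : n ∉ pvJUNG) :
    pvCombineA (c :: n :: r) = c :: pvCombineA (n :: r) := by
  conv_lhs => rw [pvCombineA.eq_def]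
  simp [hc, hn]

theorem pvA_cv_nil {c v : Char} (hc : c ∈ pvCHO) (hv : v ∈ pvJUNG) :
    pvCombineA [c, v] = [pvCompose c v 0] := by
  simp [pvCombineA, pvCompose, pvMul, hc, hv]

theorem pvA_cv_not_jong {c v t : Char} (r : List Char) (hc : c ∈ pvCHO) (hv : v ∈ pvJUNG)
    (ht : t ∉ pvJONG1) :
    pvCombineA (c :: v :: t :: r) = pvCompose c v 0 :: pvCombineA (t :: r) := by
  conv_lhs => rw [pvCombineA.eq_def]
  simp [pvCompose, pvMul, hc, hv, ht]

theorem pvA_cvt_nil {c v t : Char} (hc : c ∈ pvCHO) (hv : v ∈ pvJUNG) (ht : t ∈ pvJONG1) :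
    pvCombineA [c, v, t] = [pvCompose c v ((PySem.List.index? pvJONG1 t).getD 0 + 1)] := by
  simp [pvCombineA, pvCompose, pvMul, hc, hv, ht]

theorem pvA_cvt_jung {c v t f : Char} (r : List Char) (hc : c ∈ pvCHO) (hv : v ∈ pvJUNG)
    (ht : t ∈ pvJONG1) (hf : f ∈ pvJUNG) :
    pvCombineA (c :: v :: t :: f :: r) = pvCompose c v 0 :: pvCombineA (t :: f :: r) := by
  conv_lhs => rw [pvCombineA.eq_def]
  simp [pvCompose, pvMul, hc, hv, ht, hf]

theorem pvA_cvt_not_jung {c v t f : Char} (r : List Char) (hc : c ∈ pvCHO) (hv : v ∈ pvJUNG)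
    (ht : t ∈ pvJONG1) (hf : f ∉ pvJUNG) :
    pvCombineA (c :: v :: t :: f :: r) =
      pvCompose c v ((PySem.List.index? pvJONG1 t).getD 0 + 1) :: pvCombineA (f :: r) := by
  conv_lhs => rw [pvCombineA.eq_def]
  simp [pvCompose, pvMul, hc, hv, ht, hf]

-- the machine from any reachable state agrees with A's loop on the corresponding suffix
theorem pvMain : ∀ (N : Nat) (l : List Char), l.length ≤ N →
    (pvRunB .empty l = pvCombineA l) ∧
    (∀ c, c ∈ pvCHO → pvRunB (.cho c) l = pvCombineA (c :: l)) ∧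
    (∀ c v, c ∈ pvCHO → v ∈ pvJUNG → pvRunB (.cj c v) l = pvCombineA (c :: v :: l)) ∧
    (∀ c v t, c ∈ pvCHO → v ∈ pvJUNG → t ∈ pvJONG1 →
      pvRunB (.cjj c v t) l = pvCombineA (c :: v :: t :: l)) := by
  intro N
  induction N with
  | zero =>
    intro l hl
    have hnil : l = [] := by cases l with | nil => rfl | cons a b => simp at hl
    subst hnil
    refine ⟨by simp [pvRunB, pvFlush, pvA_nil], ?_, ?_, ?_⟩
    · intro c hc; simp [pvRunB, pvFlush, pvA_one]
    · intro c v hc hv; simp [pvRunB, pvFlush, pvA_cv_nil hc hv]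
    · intro c v t hc hv ht; simp [pvRunB, pvFlush, pvA_cvt_nil hc hv ht]
  | succ n ih =>
    intro l hl
    cases l with
    | nil =>
      refine ⟨by simp [pvRunB, pvFlush, pvA_nil], ?_, ?_, ?_⟩
      · intro c hc; simp [pvRunB, pvFlush, pvA_one]
      · intro c v hc hv; simp [pvRunB, pvFlush, pvA_cv_nil hc hv]
      · intro c v t hc hv ht; simp [pvRunB, pvFlush, pvA_cvt_nil hc hv ht]
    | cons ch r =>
      have hr : r.length ≤ n := by simp at hl; omega
      refine ⟨?_, ?_, ?_, ?_⟩
      · -- empty state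
        by_cases hc : ch ∈ pvCHO
        · have := (ih r hr).2.1 ch hc
          simpa [pvRunB, pvStep, pvStepEmpty, hc] using this
        · have := (ih r hr).1
          simp [pvRunB, pvStep, pvStepEmpty, hc, this, pvA_not_cho r hc]
      · -- lone 초성 c
        intro c hcC
        by_cases hv : ch ∈ pvJUNG
        · have := (ih r hr).2.2.1 c ch hcC hv
          simpa [pvRunB, pvStep, hv] using this
        · rw [pvA_cho_not_jung r hcC hv]
          by_cases hc2 : ch ∈ pvCHO
          · have := (ih r hr).2.1 ch hc2
            simp [pvRunB, pvStep, pvStepEmpty, hv, hc2, this]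
          · have := (ih r hr).1
            simp [pvRunB, pvStep, pvStepEmpty, hv, hc2, this, pvA_not_cho r hc2]
      · -- open syllable c v
        intro c v hcC hvV
        by_cases ht : ch ∈ pvJONG1
        · have := (ih r hr).2.2.2 c v ch hcC hvV ht
          simpa [pvRunB, pvStep, ht] using this
        · rw [pvA_cv_not_jong r hcC hvV ht]
          by_cases hc2 : ch ∈ pvCHO
          · have := (ih r hr).2.1 ch hc2
            simp [pvRunB, pvStep, pvStepEmpty, ht, hc2, this]
          · have := (ih r hr).1
            simp [pvRunB, pvStep, pvStepEmpty, ht, hc2, this, pvA_not_cho r hc2]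
      · -- open syllable c v with buffered consonant t
        intro c v t hcC hvV htJ
        by_cases hv2 : ch ∈ pvJUNG
        · rw [pvA_cvt_jung r hcC hvV htJ hv2]
          by_cases htc : t ∈ pvCHO
          · have := (ih r hr).2.2.1 t ch htc hv2
            simp [pvRunB, pvStep, hv2, htc, this]
          · have h1 := (ih r hr).1
            rw [pvA_not_cho (ch :: r) htc, pvA_not_cho r (pvJung_not_cho hv2)]
            simp [pvRunB, pvStep, hv2, htc, h1]
        · rw [pvA_cvt_not_jung r hcC hvV htJ hv2]
          by_cases hc2 : ch ∈ pvCHO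
          · have := (ih r hr).2.1 ch hc2
            simp [pvRunB, pvStep, pvStepEmpty, hv2, hc2, this]
          · have := (ih r hr).1
            simp [pvRunB, pvStep, pvStepEmpty, hv2, hc2, this, pvA_not_cho r hc2]

theorem pvShort (l : List Char) (h : l.length < 2) : pvCombineA l = l := by
  match l, h with
  | [], _ => exact pvA_nil
  | [c], _ => exact pvA_one c

theorem english_to_korean_spec : Claim_equal_english_to_korean := by
  intro text _
  unfold Spec_english_to_korean english_to_korean english_to_korean_alt
  have h1 := (pvMain _ (text.toList.map (fun c => pvEngKor.getD c c)) le_rfl).1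
  by_cases h : (text.toList.map (fun c => pvEngKor.getD c c)).length < 2
  · simp only [h, if_pos, h1, pvShort _ h]
  · simp only [h, h1, if_false]
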